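-- pv_equiv track=rewrite | github.com/smkwray/tdcpass | src/tdcpass/analysis/proxy_coverage.py | _status_from_key_horizons
-- ===== SOURCE A (Python) =====
-- from typing import Any
--
-- def _status_from_key_horizons(key_horizons: dict[str, dict[str, Any]]) -> str:
--     labels = {str(payload.get("coverage_label", "")) for payload in key_horizons.values()}
--     if labels & {"proxy_bundle_opposite_direction"}:
--         return "mixed"
--     if labels and labels <= {
--         "proxy_bundle_uncovered_remainder_large",
--         "proxy_bundle_weak",
--         "other_component_not_decisive",
--         "missing_other_component_response",
--     }:
--         return "weak"
--     if labels <= {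
--         "proxy_bundle_mostly_covers_other",
--         "proxy_bundle_partial_same_sign_support",
--         "proxy_bundle_same_sign_but_not_decisive",
--     }:
--         return "partial_support"
--     return "mixed"
-- ===== SOURCE B (Python) =====
-- _CATEGORY = {
--     "proxy_bundle_opposite_direction": "X",
--     "proxy_bundle_uncovered_remainder_large": "W",
--     "proxy_bundle_weak": "W",
--     "other_component_not_decisive": "W",
--     "missing_other_component_response": "W",
--     "proxy_bundle_mostly_covers_other": "P",
--     "proxy_bundle_partial_same_sign_support": "P",
--     "proxy_bundle_same_sign_but_not_decisive": "P",
-- }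
--
-- _VERDICT = {
--     "E": "partial_support",  # no labels at all
--     "W": "weak",
--     "P": "partial_support",
--     "M": "mixed",
--     "X": "mixed",
-- }
--
-- def _join(a, b):
--     # join in the flat semilattice E < {W, P, atoms...} < M < X
--     if a == "X" or b == "X":
--         return "X"
--     if a == "E":
--         return b
--     if b == "E":
--         return a
--     return a if a == b else "M"
--
-- def _status_from_key_horizons(key_horizons):
--     acc = "E"
--     for payload in key_horizons.values():
--         acc = _join(acc, _CATEGORY.get(str(payload.get("coverage_label", "")), "M"))
--     return _VERDICT.get(acc, "mixed")
-- ===== Notes on version B (the rewrite author's own statement) =====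
-- stated objective: alternative
-- what changed: B replaces A's set materialization and set algebra by classifying each label into a 5-point flat semilattice (E/W/P/M/X) via a label->category table and folding the lattice join over the values, reading the status off the final lattice element.
import Mathlib
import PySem

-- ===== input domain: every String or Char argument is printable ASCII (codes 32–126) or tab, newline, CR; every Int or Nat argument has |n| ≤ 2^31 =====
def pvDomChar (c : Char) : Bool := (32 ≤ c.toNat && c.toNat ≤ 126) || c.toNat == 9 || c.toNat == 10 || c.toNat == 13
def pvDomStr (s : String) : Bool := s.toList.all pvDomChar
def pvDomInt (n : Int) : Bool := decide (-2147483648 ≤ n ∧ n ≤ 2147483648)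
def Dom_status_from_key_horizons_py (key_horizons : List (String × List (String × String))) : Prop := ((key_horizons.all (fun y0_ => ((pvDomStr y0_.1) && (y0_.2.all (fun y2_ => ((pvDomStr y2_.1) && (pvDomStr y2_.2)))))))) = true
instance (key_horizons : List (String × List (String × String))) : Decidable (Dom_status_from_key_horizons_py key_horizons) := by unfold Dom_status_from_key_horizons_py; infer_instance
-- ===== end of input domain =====

-- One honest line: B classifies each label into a 5-point flat semilattice (E/W/P/M/X) via a
-- label→category table and folds the lattice join, instead of A's set algebra (objective: alternative).

-- ===== PORT A =====
def status_from_key_horizons_py (key_horizons : List (String × List (String × String))) : String :=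
  let labels : PySem.Set String :=
    PySem.Set.ofList (key_horizons.map (fun payload => PySem.Dict.getD (PySem.Dict.mk payload.2) "coverage_label" ""))
  if PySem.Set.inter labels (PySem.Set.ofList ["proxy_bundle_opposite_direction"]) ≠ [] then
    "mixed"
  else if labels ≠ [] ∧ PySem.Set.issubset labels (PySem.Set.ofList
      ["proxy_bundle_uncovered_remainder_large",
       "proxy_bundle_weak",
       "other_component_not_decisive",
       "missing_other_component_response"]) = true then
    "weak"
  else if PySem.Set.issubset labels (PySem.Set.ofList
      ["proxy_bundle_mostly_covers_other",
       "proxy_bundle_partial_same_sign_support",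
       "proxy_bundle_same_sign_but_not_decisive"]) = true then
    "partial_support"
  else
    "mixed"

-- ===== PORT B =====
-- Source B's module-level tables
def pvCategoryTable : PySem.Dict String String :=
  PySem.Dict.mk
    [("proxy_bundle_opposite_direction", "X"),
     ("proxy_bundle_uncovered_remainder_large", "W"),
     ("proxy_bundle_weak", "W"),
     ("other_component_not_decisive", "W"),
     ("missing_other_component_response", "W"),
     ("proxy_bundle_mostly_covers_other", "P"),
     ("proxy_bundle_partial_same_sign_support", "P"),
     ("proxy_bundle_same_sign_but_not_decisive", "P")]

def pvVerdictTable : PySem.Dict String String :=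
  PySem.Dict.mk
    [("E", "partial_support"), ("W", "weak"), ("P", "partial_support"),
     ("M", "mixed"), ("X", "mixed")]

-- Source B's _join: the join of the flat semilattice E < {W, P, atoms…} < M < X
def pvJoin (a b : String) : String :=
  if a == "X" || b == "X" then "X"
  else if a == "E" then b
  else if b == "E" then a
  else if a == b then a
  else "M"

def status_from_key_horizons_py_alt (key_horizons : List (String × List (String × String))) : String :=
  let acc := key_horizons.foldl
    (fun acc payload =>
      pvJoin acc (PySem.Dict.getD pvCategoryTable
        (PySem.Dict.getD (PySem.Dict.mk payload.2) "coverage_label" "") "M")) "E"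
  PySem.Dict.getD pvVerdictTable acc "mixed"

-- ===== PRECONDITION & SPEC =====
def Spec_status_from_key_horizons_py (key_horizons : List (String × List (String × String))) (out : String) : Prop := out = status_from_key_horizons_py_alt key_horizons
instance (key_horizons : List (String × List (String × String))) (out : String) : Decidable (Spec_status_from_key_horizons_py key_horizons out) := by unfold Spec_status_from_key_horizons_py; infer_instance

-- ===== CLAIM =====
def Claim_equal_status_from_key_horizons_py : Prop := ∀ (key_horizons : List (String × List (String × String))), Dom_status_from_key_horizons_py key_horizons → Spec_status_from_key_horizons_py key_horizons (status_from_key_horizons_py key_horizons)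

-- ===== LEMMAS AND PROOFS =====

def pvLabel (payload : String × List (String × String)) : String :=
  PySem.Dict.getD (PySem.Dict.mk payload.2) "coverage_label" ""

def pvCat (l : String) : String := PySem.Dict.getD pvCategoryTable l "M"

def pvWeak : List String :=
  ["proxy_bundle_uncovered_remainder_large",
   "proxy_bundle_weak",
   "other_component_not_decisive",
   "missing_other_component_response"]

def pvPartial : List String :=
  ["proxy_bundle_mostly_covers_other",
   "proxy_bundle_partial_same_sign_support",
   "proxy_bundle_same_sign_but_not_decisive"]

-- the five lattice elements / the four categories a label can get
def pvFive (a : String) : Prop := a = "E" ∨ a = "X" ∨ a = "W" ∨ a = "P" ∨ a = "M"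

lemma pvCat_cases (l : String) :
    (l = "proxy_bundle_opposite_direction" ∧ pvCat l = "X") ∨
    (l ∈ pvWeak ∧ pvCat l = "W") ∨
    (l ∈ pvPartial ∧ pvCat l = "P") ∨
    (l ≠ "proxy_bundle_opposite_direction" ∧ l ∉ pvWeak ∧ l ∉ pvPartial ∧ pvCat l = "M") := by
  unfold pvCat pvCategoryTable pvWeak pvPartial
  simp only [PySem.Dict.getD, PySem.Dict.get?_mk_cons]
  split_ifs with h1 h2 h3 h4 h5 h6 h7 h8
  all_goals simp_all [PySem.Dict.get?, beq_iff_eq]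
  exact ⟨fun h => h1 h.symm, ⟨fun h => h2 h.symm, fun h => h3 h.symm, fun h => h4 h.symm,
    fun h => h5 h.symm⟩, fun h => h6 h.symm, fun h => h7 h.symm, fun h => h8 h.symm⟩

lemma pvCat_five (l : String) : pvFive (pvCat l) := by
  rcases pvCat_cases l with ⟨_, hc⟩ | ⟨_, hc⟩ | ⟨_, hc⟩ | ⟨_, _, _, hc⟩ <;> rw [hc] <;>
    simp [pvFive]

lemma pvJoin_five {a b : String} (ha : pvFive a) (hb : pvFive b) : pvFive (pvJoin a b) := by
  unfold pvFive at *
  rcases ha with rfl | rfl | rfl | rfl | rfl <;> rcases hb with rfl | rfl | rfl | rfl | rfl <;>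
    decide

lemma pvJoin_E_left {b : String} (hb : pvFive b) : pvJoin "E" b = b := by
  rcases hb with rfl | rfl | rfl | rfl | rfl <;> decide

lemma pvJoin_assoc5 {a b c : String} (ha : pvFive a) (hb : pvFive b) (hc : pvFive c) :
    pvJoin (pvJoin a b) c = pvJoin a (pvJoin b c) := by
  rcases ha with rfl | rfl | rfl | rfl | rfl <;> rcases hb with rfl | rfl | rfl | rfl | rfl <;>
    rcases hc with rfl | rfl | rfl | rfl | rfl <;> decide

-- Source B's loop body, over payloads
def pvStep (acc : String) (payload : String × List (String × String)) : String :=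
  pvJoin acc (pvCat (pvLabel payload))

lemma pvFold_five (kh : List (String × List (String × String))) {a : String} (ha : pvFive a) :
    pvFive (kh.foldl pvStep a) := by
  induction kh generalizing a with
  | nil => exact ha
  | cons x xs ih => exact ih (pvJoin_five ha (pvCat_five _))

lemma pvFold_acc (kh : List (String × List (String × String))) {a : String} (ha : pvFive a) :
    kh.foldl pvStep a = pvJoin a (kh.foldl pvStep "E") := by
  induction kh generalizing a with
  | nil =>
    rcases ha with rfl | rfl | rfl | rfl | rfl <;> decide
  | cons x xs ih =>
    simp only [List.foldl_cons]
    rw [show pvStep a x = pvJoin a (pvCat (pvLabel x)) from rfl,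
        show pvStep "E" x = pvJoin "E" (pvCat (pvLabel x)) from rfl,
        ih (pvJoin_five ha (pvCat_five _)),
        ih (pvJoin_five (by simp [pvFive]) (pvCat_five _)),
        pvJoin_E_left (pvCat_five _),
        pvJoin_assoc5 ha (pvCat_five _) (pvFold_five xs (by simp [pvFive]))]

-- the fold of Source B, characterized as a case split on the label list
def pvG (L : List String) : String :=
  if L.any (fun l => l = "proxy_bundle_opposite_direction") then "X"
  else if L.isEmpty then "E"
  else if L.all (fun l => l ∈ pvWeak) then "W"
  else if L.all (fun l => l ∈ pvPartial) then "P"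
  else "M"

lemma pvWeak_ne_opp {l : String} (h : l ∈ pvWeak) :
    l ≠ "proxy_bundle_opposite_direction" := by fin_cases h <;> decide

lemma pvWeak_not_partial {l : String} (h : l ∈ pvWeak) : l ∉ pvPartial := by
  fin_cases h <;> decide

lemma pvPartial_ne_opp {l : String} (h : l ∈ pvPartial) :
    l ≠ "proxy_bundle_opposite_direction" := by fin_cases h <;> decide

lemma pvPartial_not_weak {l : String} (h : l ∈ pvPartial) : l ∉ pvWeak := by
  fin_cases h <;> decide

lemma pvJoin_X_left (b : String) : pvJoin "X" b = "X" := by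
  simp [pvJoin]

lemma pvG_opp {M : List String}
    (hA : M.any (fun l => l = "proxy_bundle_opposite_direction") = true) : pvG M = "X" := by
  unfold pvG; rw [if_pos hA]

lemma pvG_of_no_opp {l : String} {M : List String}
    (h1 : l ≠ "proxy_bundle_opposite_direction")
    (hA : M.any (fun x => x = "proxy_bundle_opposite_direction") = false) :
    pvG (l :: M) =
      (if l ∈ pvWeak ∧ M.all (fun x => x ∈ pvWeak) = true then "W"
       else if l ∈ pvPartial ∧ M.all (fun x => x ∈ pvPartial) = true then "P"
       else "M") := by
  unfold pvG
  rw [if_neg (by simp [List.any_cons, hA, h1]), if_neg (by simp)]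
  by_cases hw : l ∈ pvWeak ∧ M.all (fun x => x ∈ pvWeak) = true
  · rw [if_pos (by simp [List.all_cons, hw.1, hw.2]), if_pos hw]
  · rw [if_neg (by
      simp only [List.all_cons, Bool.and_eq_true, decide_eq_true_eq]
      exact fun hc => hw ⟨hc.1, hc.2⟩), if_neg hw]
    by_cases hp : l ∈ pvPartial ∧ M.all (fun x => x ∈ pvPartial) = true
    · rw [if_pos (by simp [List.all_cons, hp.1, hp.2]), if_pos hp]
    · rw [if_neg (by
        simp only [List.all_cons, Bool.and_eq_true, decide_eq_true_eq]
        exact fun hc => hp ⟨hc.1, hc.2⟩), if_neg hp]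

lemma pvG_eval_no_opp {M : List String}
    (hA : M.any (fun x => x = "proxy_bundle_opposite_direction") = false) :
    pvG M = (if M = [] then "E"
      else if M.all (fun x => x ∈ pvWeak) = true then "W"
      else if M.all (fun x => x ∈ pvPartial) = true then "P"
      else "M") := by
  unfold pvG
  rw [if_neg (by simp [hA])]
  by_cases hEm : M = []
  · rw [if_pos (by simp [hEm]), if_pos hEm]
  · rw [if_neg (by simp [List.isEmpty_iff, hEm]), if_neg hEm]

lemma pvJoin_cat_G (l : String) (M : List String) :
    pvJoin (pvCat l) (pvG M) = pvG (l :: M) := by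
  rcases pvCat_cases l with ⟨hx, hc⟩ | ⟨hx, hc⟩ | ⟨hx, hc⟩ | ⟨hx1, hx2, hx3, hc⟩ <;> rw [hc]
  · rw [pvJoin_X_left, pvG_opp (M := l :: M) (by simp [hx])]
  · -- weak label
    have h1 := pvWeak_ne_opp hx
    have h2 := pvWeak_not_partial hx
    by_cases hA : M.any (fun x => x = "proxy_bundle_opposite_direction") = true
    · rw [pvG_opp hA, pvG_opp (M := l :: M) (by simp only [List.any_cons, hA, Bool.or_true])]
      decide
    · have hA' : M.any (fun x => x = "proxy_bundle_opposite_direction") = false := Bool.eq_false_iff.2 hA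

      rw [pvG_eval_no_opp hA', pvG_of_no_opp h1 hA']
      by_cases hEm : M = []
      · rw [if_pos hEm, if_pos ⟨hx, by simp [hEm]⟩]; decide
      · rw [if_neg hEm]
        by_cases hWall : M.all (fun x => x ∈ pvWeak) = true
        · rw [if_pos hWall, if_pos ⟨hx, hWall⟩]; decide
        · rw [if_neg hWall]
          by_cases hPall : M.all (fun x => x ∈ pvPartial) = true
          · rw [if_pos hPall, if_neg (fun hc => hWall hc.2), if_neg (fun hc => h2 hc.1)]
            decide
          · rw [if_neg hPall, if_neg (fun hc => hWall hc.2), if_neg (fun hc => h2 hc.1)]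
            decide
  · -- partial label
    have h1 := pvPartial_ne_opp hx
    have h2 := pvPartial_not_weak hx
    by_cases hA : M.any (fun x => x = "proxy_bundle_opposite_direction") = true
    · rw [pvG_opp hA, pvG_opp (M := l :: M) (by simp only [List.any_cons, hA, Bool.or_true])]
      decide
    · have hA' : M.any (fun x => x = "proxy_bundle_opposite_direction") = false := Bool.eq_false_iff.2 hA

      rw [pvG_eval_no_opp hA', pvG_of_no_opp h1 hA']
      by_cases hEm : M = []
      · rw [if_pos hEm, if_neg (fun hc => h2 hc.1), if_pos ⟨hx, by simp [hEm]⟩]; decide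
      · rw [if_neg hEm]
        by_cases hWall : M.all (fun x => x ∈ pvWeak) = true
        · have hPf : ¬ (M.all (fun x => x ∈ pvPartial) = true) := fun hp => by
            obtain ⟨y, hy⟩ := List.exists_mem_of_ne_nil M hEm
            exact pvWeak_not_partial (by simpa using List.all_eq_true.1 hWall y hy)
              (by simpa using List.all_eq_true.1 hp y hy)
          rw [if_pos hWall, if_neg (fun hc => h2 hc.1), if_neg (fun hc => hPf hc.2)]; decide
        · rw [if_neg hWall]
          by_cases hPall : M.all (fun x => x ∈ pvPartial) = true
          · rw [if_pos hPall, if_neg (fun hc => h2 hc.1), if_pos ⟨hx, hPall⟩]; decide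
          · rw [if_neg hPall, if_neg (fun hc => h2 hc.1), if_neg (fun hc => hPall hc.2)]; decide
  · -- unknown label
    by_cases hA : M.any (fun x => x = "proxy_bundle_opposite_direction") = true
    · rw [pvG_opp hA, pvG_opp (M := l :: M) (by simp only [List.any_cons, hA, Bool.or_true])]
      decide
    · have hA' : M.any (fun x => x = "proxy_bundle_opposite_direction") = false := Bool.eq_false_iff.2 hA

      rw [pvG_eval_no_opp hA', pvG_of_no_opp hx1 hA']
      by_cases hEm : M = []
      · rw [if_pos hEm, if_neg (fun hc => hx2 hc.1), if_neg (fun hc => hx3 hc.1)]; decide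
      · rw [if_neg hEm]
        by_cases hWall : M.all (fun x => x ∈ pvWeak) = true
        · rw [if_pos hWall, if_neg (fun hc => hx2 hc.1), if_neg (fun hc => hx3 hc.1)]; decide
        · rw [if_neg hWall]
          by_cases hPall : M.all (fun x => x ∈ pvPartial) = true
          · rw [if_pos hPall, if_neg (fun hc => hx2 hc.1), if_neg (fun hc => hx3 hc.1)]; decide
          · rw [if_neg hPall, if_neg (fun hc => hx2 hc.1), if_neg (fun hc => hx3 hc.1)]; decide

lemma pvFold_char (kh : List (String × List (String × String))) :
    kh.foldl pvStep "E" = pvG (kh.map pvLabel) := by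
  induction kh with
  | nil => decide
  | cons x xs ih =>
    simp only [List.foldl_cons, List.map_cons]
    rw [show pvStep "E" x = pvJoin "E" (pvCat (pvLabel x)) from rfl,
        pvJoin_E_left (pvCat_five _), pvFold_acc xs (pvCat_five _), ih,
        pvJoin_cat_G]

lemma pvOfList_eq_nil_iff (L : List String) : (PySem.Set.ofList L = []) ↔ L = [] := by
  constructor
  · intro h
    by_contra hne
    rcases List.exists_mem_of_ne_nil L hne with ⟨x, hx⟩
    have := (PySem.Set.mem_ofList L x).2 hx
    simp [h] at this
  · rintro rfl; rfl

lemma pvInter_ne_nil_iff (L : List String) (x : String) :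
    (PySem.Set.inter (PySem.Set.ofList L) (PySem.Set.ofList [x]) ≠ []) ↔ x ∈ L := by
  simp [pysem, PySem.Set.inter]

lemma pvSubset_iff (L S : List String) :
    PySem.Set.issubset (PySem.Set.ofList L) (PySem.Set.ofList S) = true ↔
      L.all (fun l => l ∈ S) = true := by
  rw [PySem.Set.issubset_iff, List.all_eq_true]
  constructor
  · intro hsub x hx
    have := hsub x ((PySem.Set.mem_ofList L x).2 hx)
    simpa using (PySem.Set.mem_ofList S x).1 this
  · intro hall x hx
    exact (PySem.Set.mem_ofList S x).2 (by simpa using hall x ((PySem.Set.mem_ofList L x).1 hx))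

-- ===== VERDICT =====
theorem status_from_key_horizons_py_spec : Claim_equal_status_from_key_horizons_py := by
  intro kh _
  unfold Spec_status_from_key_horizons_py status_from_key_horizons_py status_from_key_horizons_py_alt
  rw [show (fun acc (payload : String × List (String × String)) =>
      pvJoin acc (PySem.Dict.getD pvCategoryTable
        (PySem.Dict.getD (PySem.Dict.mk payload.2) "coverage_label" "") "M")) = pvStep from rfl,
    pvFold_char]
  set L : List String := kh.map pvLabel with hL
  have eL : (kh.map fun payload => PySem.Dict.getD (PySem.Dict.mk payload.2) "coverage_label" "") = L := rfl
  rw [eL]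
  by_cases hOpp : "proxy_bundle_opposite_direction" ∈ L
  · rw [if_pos ((pvInter_ne_nil_iff L _).2 hOpp),
      pvG_opp (List.any_eq_true.2 ⟨_, hOpp, by simp⟩)]
    rfl
  · rw [if_neg (by simpa using (not_iff_not.2 (pvInter_ne_nil_iff L _)).2 hOpp)]
    have hAny : (L.any (fun l => l = "proxy_bundle_opposite_direction")) = false := by
      refine List.any_eq_false.2 fun x hx => ?_
      have hne : ¬ x = "proxy_bundle_opposite_direction" := fun h => hOpp (h ▸ hx)
      simpa using hne
    rw [pvG_eval_no_opp hAny]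
    have hWrw : PySem.Set.issubset (PySem.Set.ofList L) (PySem.Set.ofList
        ["proxy_bundle_uncovered_remainder_large", "proxy_bundle_weak",
         "other_component_not_decisive", "missing_other_component_response"]) = true ↔
        L.all (fun l => l ∈ pvWeak) = true := by
      rw [show ["proxy_bundle_uncovered_remainder_large", "proxy_bundle_weak",
        "other_component_not_decisive", "missing_other_component_response"] = pvWeak from rfl]
      exact pvSubset_iff L pvWeak
    have hPrw : PySem.Set.issubset (PySem.Set.ofList L) (PySem.Set.ofList
        ["proxy_bundle_mostly_covers_other", "proxy_bundle_partial_same_sign_support",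
         "proxy_bundle_same_sign_but_not_decisive"]) = true ↔
        L.all (fun l => l ∈ pvPartial) = true := by
      rw [show ["proxy_bundle_mostly_covers_other", "proxy_bundle_partial_same_sign_support",
        "proxy_bundle_same_sign_but_not_decisive"] = pvPartial from rfl]
      exact pvSubset_iff L pvPartial
    by_cases hE : L = []
    · rw [if_pos hE,
        if_neg (fun hc => hc.1 ((pvOfList_eq_nil_iff L).2 hE)),
        if_pos (hPrw.2 (by simp [hE]))]
      rfl
    · rw [if_neg hE]
      have hNE : ¬ PySem.Set.ofList L = [] := fun h => hE ((pvOfList_eq_nil_iff L).1 h)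
      by_cases hW : L.all (fun l => l ∈ pvWeak) = true
      · rw [if_pos ⟨hNE, hWrw.2 hW⟩, if_pos hW]
        rfl
      · rw [if_neg (fun hc => hW (hWrw.1 hc.2)), if_neg hW]
        by_cases hP : L.all (fun l => l ∈ pvPartial) = true
        · rw [if_pos (hPrw.2 hP), if_pos hP]
          rfl
        · rw [if_neg (fun hc => hP (hPrw.1 hc)), if_neg hP]
          rfl
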